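-- pv_equiv track=rewrite | github.com/ganbaroff/volaura | packages/swarm/skills.py | match_skills
-- ===== SOURCE A (Python) =====
-- _SKILL_KEYWORDS: dict[str, list[str]] = {
--     "SECURITY-REVIEW": ["security", "auth", "rls", "owasp", "vulnerability", "attack", "injection", "xss"],
--     "CODE-REVIEW": ["code", "refactor", "architecture", "pattern", "review", "quality"],
--     "TDD-WORKFLOW": ["test", "tdd", "pytest", "coverage", "bug", "regression"],
--     "CONTINUOUS-LEARNING": ["learn", "improve", "retrospective", "calibrate"],
--     "decision-simulation": ["decision", "dsp", "evaluate", "path", "trade-off"],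
--     "DESIGN-HANDOFF": ["design", "ui", "ux", "component", "figma", "v0"],
-- }
--
-- def match_skills(task_text: str, max_skills: int = 3) -> list[str]:
--     """Auto-detect which skills are relevant for a task."""
--     task_lower = task_text.lower()
--     scores: dict[str, int] = {}
--
--     for skill_name, keywords in _SKILL_KEYWORDS.items():
--         score = sum(1 for kw in keywords if kw in task_lower)
--         if score > 0:
--             scores[skill_name] = score
--
--     # Sort by relevance, return top N
--     ranked = sorted(scores.items(), key=lambda x: -x[1])
--     return [name for name, _ in ranked[:max_skills]]
-- ===== SOURCE B (Python) =====
-- _SKILL_KEYWORDS: dict[str, list[str]] = {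
--     "SECURITY-REVIEW": ["security", "auth", "rls", "owasp", "vulnerability", "attack", "injection", "xss"],
--     "CODE-REVIEW": ["code", "refactor", "architecture", "pattern", "review", "quality"],
--     "TDD-WORKFLOW": ["test", "tdd", "pytest", "coverage", "bug", "regression"],
--     "CONTINUOUS-LEARNING": ["learn", "improve", "retrospective", "calibrate"],
--     "decision-simulation": ["decision", "dsp", "evaluate", "path", "trade-off"],
--     "DESIGN-HANDOFF": ["design", "ui", "ux", "component", "figma", "v0"],
-- }
--
-- def match_skills(task_text: str, max_skills: int = 3) -> list[str]:
--     """Auto-detect which skills are relevant for a task (rank by score levels, no sort)."""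
--     task_lower = task_text.lower()
--     scored: list[tuple[str, int]] = []
--     max_score = 0
--     for skill_name, keywords in _SKILL_KEYWORDS.items():
--         score = 0
--         for kw in keywords:
--             if kw in task_lower:
--                 score += 1
--         if score > 0:
--             scored.append((skill_name, score))
--             if score > max_score:
--                 max_score = score
--     ranked: list[str] = []
--     for s in range(max_score, 0, -1):
--         for name, sc in scored:
--             if sc == s:
--                 ranked.append(name)
--     return ranked[:max_skills]
-- ===== Notes on version B (the rewrite author's own statement) =====
-- stated objective: alternative
-- what changed: B replaces the sorted() call by a per-score descending sweep (bucket-style selection): it tracks the maximum score while scoring and then emits, for each score level from max down to 1, the skills with that score in insertion order, reproducing the stable descending sort and the [:max_skills] slice exactly.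
import Mathlib
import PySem

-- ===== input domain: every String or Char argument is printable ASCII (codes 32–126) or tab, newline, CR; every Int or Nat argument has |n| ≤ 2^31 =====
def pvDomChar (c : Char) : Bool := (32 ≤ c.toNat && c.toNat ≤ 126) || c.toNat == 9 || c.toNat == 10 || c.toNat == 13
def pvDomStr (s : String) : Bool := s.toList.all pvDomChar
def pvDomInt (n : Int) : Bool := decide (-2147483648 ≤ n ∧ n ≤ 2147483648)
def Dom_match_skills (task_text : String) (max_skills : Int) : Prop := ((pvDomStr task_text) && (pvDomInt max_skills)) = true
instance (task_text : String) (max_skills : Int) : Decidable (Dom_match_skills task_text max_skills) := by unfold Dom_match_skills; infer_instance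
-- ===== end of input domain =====

-- B replaces Python's sorted() by a per-score descending sweep over the scored skills
-- (alternative decomposition; same results incl. stable tie order and the [:max_skills] slice).

-- the module-level _SKILL_KEYWORDS table (shared constant of both ports)
def skillKeywords : List (String × List String) :=
  [ ("SECURITY-REVIEW", ["security", "auth", "rls", "owasp", "vulnerability", "attack", "injection", "xss"]),
    ("CODE-REVIEW", ["code", "refactor", "architecture", "pattern", "review", "quality"]),
    ("TDD-WORKFLOW", ["test", "tdd", "pytest", "coverage", "bug", "regression"]),
    ("CONTINUOUS-LEARNING", ["learn", "improve", "retrospective", "calibrate"]),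
    ("decision-simulation", ["decision", "dsp", "evaluate", "path", "trade-off"]),
    ("DESIGN-HANDOFF", ["design", "ui", "ux", "component", "figma", "v0"]) ]

-- ===== PORT A =====
def match_skills (task_text : String) (max_skills : Int) : List String :=
  let task_lower := PySem.Str.lower task_text
  let scores : PySem.Dict String Int :=
    skillKeywords.foldl (fun scores p =>
      let score : Int := ((p.2.filter (fun kw => PySem.Str.isIn kw task_lower)).map (fun _ => (1:Int))).sum
      if score > 0 then scores.insert p.1 score else scores) (PySem.Dict.mk [])
  let ranked := PySem.List.sorted scores.items (fun x => -x.2) false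
  (PySem.List.slice ranked none (some max_skills)).map (fun p => p.1)

-- ===== PORT B =====
def match_skills_alt (task_text : String) (max_skills : Int) : List String :=
  let task_lower := PySem.Str.lower task_text
  let st : List (String × Int) × Int :=
    skillKeywords.foldl (fun st p =>
      let score := p.2.foldl (fun s kw => if PySem.Str.isIn kw task_lower then s + 1 else s) (0:Int)
      if score > 0 then
        (st.1 ++ [(p.1, score)], if score > st.2 then score else st.2)
      else st) ([], 0)
  let ranked := (PySem.List.pyRange st.2 0 (-1)).foldl (fun acc s =>
      st.1.foldl (fun acc x => if x.2 == s then acc ++ [x.1] else acc) acc) []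
  PySem.List.slice ranked none (some max_skills)

-- ===== PRECONDITION & SPEC =====
def Spec_match_skills (task_text : String) (max_skills : Int) (out : List String) : Prop := out = match_skills_alt task_text max_skills
instance (task_text : String) (max_skills : Int) (out : List String) : Decidable (Spec_match_skills task_text max_skills out) := by unfold Spec_match_skills; infer_instance

-- ===== CLAIM (what is proved, stated in full; the proofs are below) =====
def Claim_equal_match_skills : Prop := ∀ (task_text : String) (max_skills : Int), Dom_match_skills task_text max_skills → Spec_match_skills task_text max_skills (match_skills task_text max_skills)

-- ===== LEMMAS AND PROOFS =====

-- the score loop of B equals the generator-sum of A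
lemma score_foldl_eq (p : String → Bool) (kws : List String) :
    kws.foldl (fun s kw => if p kw then s + 1 else s) (0:Int)
      = ((kws.filter p).map (fun _ => (1:Int))).sum := by
  rw [PySem.List.foldl_if_add_one, PySem.List.sum_map_const_int]
  simp [List.countP_eq_length_filter]

-- insertBy skips a prefix it is not inserted before
lemma insertBy_append_left {α : Type} (before : α → α → Bool) (x : α) (l1 l2 : List α)
    (h : ∀ y ∈ l1, before x y = false) :
    PySem.List.insertBy before x (l1 ++ l2) = l1 ++ PySem.List.insertBy before x l2 := by
  induction l1 with
  | nil => simp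
  | cons y ys ih =>
    have hy := h y (by simp)
    simp only [List.cons_append, PySem.List.insertBy, hy, Bool.false_eq_true, if_false]
    exact congrArg (y :: ·) (ih (fun z hz => h z (by simp [hz])))

lemma insertBy_head_before {α : Type} (before : α → α → Bool) (x : α) (l : List α)
    (h : ∀ y ∈ l, before x y = true) :
    PySem.List.insertBy before x l = x :: l := by
  cases l with
  | nil => rfl
  | cons y ys => simp [PySem.List.insertBy, h y (by simp)]

-- stable sort by descending score = concatenation of the score buckets, highest first
lemma sorted_eq_buckets (xs : List (String × Int)) (m : Int)
    (h : ∀ x ∈ xs, 1 ≤ x.2 ∧ x.2 ≤ m) :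
    PySem.List.sorted xs (fun x => -x.2) false
      = (PySem.List.pyRange m 0 (-1)).flatMap (fun s => xs.filter (fun x => x.2 == s)) := by
  induction xs using List.reverseRecOn with
  | nil => simp [PySem.List.sorted_eq_foldl_insertBy]
  | append_singleton xs x ih =>
    have hx := h x (by simp)
    have hxs : ∀ y ∈ xs, 1 ≤ y.2 ∧ y.2 ≤ m := fun y hy => h y (by simp [hy])
    rw [PySem.List.sorted_eq_foldl_insertBy, List.foldl_append, ← PySem.List.sorted_eq_foldl_insertBy,
      ih hxs]
    -- split the descending range at x's score
    have hsplit : PySem.List.pyRange m 0 (-1)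
        = (PySem.List.pyRange (x.2 + 1) (m + 1) 1).reverse ++ [x.2]
            ++ (PySem.List.pyRange 1 x.2 1).reverse := by
      rw [PySem.List.pyRange_neg_one_eq_reverse]
      norm_num
      rw [PySem.List.pyRange_one_append 1 x.2 (m+1) (by omega) (by omega),
        PySem.List.pyRange_one_cons (show x.2 < m + 1 by omega)]
    set Rhi := (PySem.List.pyRange (x.2 + 1) (m + 1) 1).reverse with hRhi
    set Rlo := (PySem.List.pyRange 1 x.2 1).reverse with hRlo
    have hhi : ∀ s ∈ Rhi, x.2 < s := by
      intro s hs; rw [hRhi, List.mem_reverse, PySem.List.mem_pyRange_one] at hs; omega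
    have hlo : ∀ s ∈ Rlo, s < x.2 := by
      intro s hs; rw [hRlo, List.mem_reverse, PySem.List.mem_pyRange_one] at hs; omega
    rw [hsplit]
    simp only [List.foldl_cons, List.foldl_nil, List.flatMap_append, List.flatMap_cons,
      List.flatMap_nil, List.filter_append]
    -- right side: buckets of xs ++ [x]
    have hfhi : Rhi.flatMap (fun s => (xs.filter (fun y => y.2 == s)) ++ ([x].filter (fun y => y.2 == s)))
        = Rhi.flatMap (fun s => xs.filter (fun y => y.2 == s)) := by
      refine List.flatMap_congr (fun s hs => ?_)
      have := hhi s hs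
      simp only [List.filter_cons, List.filter_nil]
      have : (x.2 == s) = false := by simp; omega
      simp [this]
    have hflo : Rlo.flatMap (fun s => (xs.filter (fun y => y.2 == s)) ++ ([x].filter (fun y => y.2 == s)))
        = Rlo.flatMap (fun s => xs.filter (fun y => y.2 == s)) := by
      refine List.flatMap_congr (fun s hs => ?_)
      have := hlo s hs
      simp only [List.filter_cons, List.filter_nil]
      have : (x.2 == s) = false := by simp; omega
      simp [this]
    have hfx : (xs.filter (fun y => y.2 == x.2)) ++ ([x].filter (fun y => y.2 == x.2))
        = (xs.filter (fun y => y.2 == x.2)) ++ [x] := by simp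
    rw [hfhi, hflo, hfx]
    -- left side: insert x after the ≥-score prefix
    have h1 : PySem.List.insertBy (fun a b => decide ((fun x => -x.2) a < (fun x => -x.2) b)) x
        ((Rhi.flatMap (fun s => xs.filter (fun y => y.2 == s))
          ++ (xs.filter (fun y => y.2 == x.2)))
          ++ Rlo.flatMap (fun s => xs.filter (fun y => y.2 == s)))
        = (Rhi.flatMap (fun s => xs.filter (fun y => y.2 == s))
            ++ (xs.filter (fun y => y.2 == x.2)))
          ++ (x :: Rlo.flatMap (fun s => xs.filter (fun y => y.2 == s))) := by
      rw [insertBy_append_left]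
      · rw [insertBy_head_before]
        intro y hy
        rcases List.mem_flatMap.mp hy with ⟨s, hs, hy2⟩
        have h2 := hlo s hs
        have : y.2 = s := by simpa using (List.of_mem_filter hy2)
        simp; omega
      · intro y hy
        rcases List.mem_append.mp hy with hy | hy
        · rcases List.mem_flatMap.mp hy with ⟨s, hs, hy2⟩
          have h2 := hhi s hs
          have : y.2 = s := by simpa using (List.of_mem_filter hy2)
          simp; omega
        · have : y.2 = x.2 := by simpa using (List.of_mem_filter hy)
          simp; omega
    simp only [List.append_nil, ← List.append_assoc] at h1 ⊢
    rw [h1]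
    simp

-- inserting a fresh key appends
lemma dict_insert_fresh (l : List (String × Int)) (k : String) (v : Int)
    (h : k ∉ l.map Prod.fst) :
    (PySem.Dict.mk l).insert k v = PySem.Dict.mk (l ++ [(k, v)]) := by
  have hc : (PySem.Dict.mk l).contains k = false := by
    simp only [PySem.Dict.contains, List.any_eq_false]
    intro p hp he
    exact h ((eq_of_beq he) ▸ List.mem_map_of_mem (f := Prod.fst) hp)
  simp [PySem.Dict.insert, hc]

-- A's dict build and B's (list, running max) build agree, and the max bounds every score
lemma build_eq {α : Type} (tbl : List α) (name : α → String) (sc : α → Int) :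
    ∀ (dacc : List (String × Int)) (macc : Int),
    (dacc.map Prod.fst ++ tbl.map name).Nodup →
    0 ≤ macc → (∀ x ∈ dacc, 1 ≤ x.2 ∧ x.2 ≤ macc) →
    (tbl.foldl (fun d p => if sc p > 0 then d.insert (name p) (sc p) else d)
        (PySem.Dict.mk dacc)).items
        = (tbl.foldl (fun st p => if sc p > 0 then
              (st.1 ++ [(name p, sc p)], if sc p > st.2 then sc p else st.2) else st)
            ((dacc, macc) : List (String × Int) × Int)).1
    ∧ 0 ≤ (tbl.foldl (fun st p => if sc p > 0 then
              (st.1 ++ [(name p, sc p)], if sc p > st.2 then sc p else st.2) else st)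
            ((dacc, macc) : List (String × Int) × Int)).2
    ∧ ∀ x ∈ (tbl.foldl (fun st p => if sc p > 0 then
              (st.1 ++ [(name p, sc p)], if sc p > st.2 then sc p else st.2) else st)
            ((dacc, macc) : List (String × Int) × Int)).1,
        1 ≤ x.2 ∧ x.2 ≤ (tbl.foldl (fun st p => if sc p > 0 then
              (st.1 ++ [(name p, sc p)], if sc p > st.2 then sc p else st.2) else st)
            ((dacc, macc) : List (String × Int) × Int)).2 := by
  induction tbl with
  | nil =>
    intro dacc macc _ hm hb
    exact ⟨rfl, hm, hb⟩
  | cons p rest ih =>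
    intro dacc macc hnd hm hb
    simp only [List.foldl_cons]
    by_cases hp : sc p > 0
    · simp only [hp, if_true]
      have hfresh : name p ∉ dacc.map Prod.fst := by
        intro hin
        exact (List.disjoint_of_nodup_append hnd) hin (by simp)
      rw [dict_insert_fresh _ _ _ hfresh]
      refine ih (dacc ++ [(name p, sc p)]) _ ?_ ?_ ?_
      · simpa using (by simpa [List.append_assoc] using hnd :
          (dacc.map Prod.fst ++ ([name p] ++ rest.map name)).Nodup)
      · split <;> omega
      · intro x hx
        rcases List.mem_append.mp hx with hx | hx
        · have := hb x hx; constructor; · omega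
          · split <;> omega
        · simp only [List.mem_singleton] at hx
          subst hx
          refine ⟨by omega, ?_⟩
          split <;> omega
    · simp only [hp, if_false]
      refine ih dacc macc (hnd.sublist ?_) hm hb
      simp only [List.map_cons]
      exact List.Sublist.append_left (List.sublist_cons_self _ _) _

-- slicing commutes with map (start omitted)
lemma slice_map_none {α β : Type} (f : α → β) (l : List α) (b : Int) :
    PySem.List.slice (l.map f) none (some b) = (PySem.List.slice l none (some b)).map f := by
  simp [PySem.List.slice, List.map_take]

-- ===== VERDICT (by name: the statement is the Claim_ definition above) =====
theorem match_skills_spec : Claim_equal_match_skills := by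
  intro task_text max_skills _
  unfold Spec_match_skills match_skills match_skills_alt
  simp only [score_foldl_eq]
  obtain ⟨h1, h2, h3⟩ := build_eq skillKeywords Prod.fst
    (fun p => ((p.2.filter (fun kw => PySem.Str.isIn kw (PySem.Str.lower task_text))).map
      (fun _ => (1:Int))).sum) [] 0 (by simp [skillKeywords]) le_rfl (by simp)
  rw [h1]
  simp only [PySem.List.foldl_append_if]
  rw [PySem.List.foldl_append_eq_flatMap, ← List.map_flatMap, ← sorted_eq_buckets _ _ h3]
  simp only [List.nil_append]
  rw [slice_map_none]
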